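-- pv_equiv track=rewrite | github.com/demin-dmitriy/icfpc2024 | py/lex.py | encode_int
-- ===== SOURCE A (Python) =====
-- def encode_int(v: int):
--     r = []
--     while v != 0:
--         v, ch = divmod(v, 94)
--         r.append(chr(ch + 33))
--
--     if len(r) == 0:
--         r = [chr(33)]
--
--     return ''.join(reversed(r))
-- ===== SOURCE B (Python) =====
-- def encode_int(v: int):
--     if v == 0:
--         return chr(33)
--
--     def go(n):
--         return '' if n == 0 else go(n // 94) + chr(n % 94 + 33)
--
--     return go(v)
-- ===== Notes on version B (the rewrite author's own statement) =====
-- stated objective: simpler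
-- what changed: Replaces the append-to-list-then-reverse loop by a recursive helper on the quotient that builds the digit string most-significant-first directly, with an explicit zero case.
import Mathlib
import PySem

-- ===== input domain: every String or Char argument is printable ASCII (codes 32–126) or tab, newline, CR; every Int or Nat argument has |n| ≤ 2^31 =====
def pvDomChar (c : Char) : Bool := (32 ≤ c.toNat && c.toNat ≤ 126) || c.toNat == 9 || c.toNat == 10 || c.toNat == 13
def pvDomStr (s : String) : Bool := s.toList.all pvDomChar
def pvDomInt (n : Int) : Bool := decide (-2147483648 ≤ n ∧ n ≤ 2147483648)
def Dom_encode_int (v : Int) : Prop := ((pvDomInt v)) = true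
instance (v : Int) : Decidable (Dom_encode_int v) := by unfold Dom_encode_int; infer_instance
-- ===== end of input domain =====

-- B replaces A's append-then-reverse loop by a recursive helper building the digit string most-significant-first (simpler decomposition; same cost).


-- ===== PORT A =====
-- the while loop of A; fuel only makes it total (v.natAbs + 1 steps suffice for v ≥ 0,
-- where the Python loop terminates); r is the Python list, appended at the back
def encodeLoopA : Nat → Int → List Char → List Char
  | 0, _, r => r
  | fuel + 1, v, r =>
    if v ≠ 0 then
      encodeLoopA fuel (PySem.Int.floordiv v 94)
        (r ++ [Char.ofNat (PySem.Int.mod v 94 + 33).toNat])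
    else r

def encode_int (v : Int) : String :=
  let r := encodeLoopA (v.natAbs + 1) v []
  let r := if r.length = 0 then [Char.ofNat 33] else r
  String.mk r.reverse

-- ===== PORT B =====
-- B's inner helper go; recursion is over Nat (exact for v ≥ 0, the only inputs B returns on)
def goB (n : Nat) : String :=
  if n = 0 then ""
  else goB (n / 94) ++ String.mk [Char.ofNat (n % 94 + 33)]
decreasing_by exact Nat.div_lt_self (Nat.pos_of_ne_zero (by assumption)) (by omega)

def encode_int_alt (v : Int) : String :=
  if v = 0 then String.mk [Char.ofNat 33] else goB v.toNat

-- ===== PRECONDITION & SPEC =====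
-- Pre_ excludes v < 0, on which Python A never returns (the floor-divmod loop runs forever).
def Pre_encode_int (v : Int) : Prop := 0 ≤ v
instance (v : Int) : Decidable (Pre_encode_int v) := by unfold Pre_encode_int; infer_instance
def pvWitness_encode_int : Int := (12345)

def Spec_encode_int (v : Int) (out : String) : Prop := out = encode_int_alt v
instance (v : Int) (out : String) : Decidable (Spec_encode_int v out) := by unfold Spec_encode_int; infer_instance

-- ===== CLAIM (what is proved, stated in full; the proofs are below) =====
def Claim_equal_encode_int : Prop := ∀ (v : Int), Dom_encode_int v → Pre_encode_int v → Spec_encode_int v (encode_int v)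

-- ===== LEMMAS AND PROOFS =====

-- digits of n, least significant first
def digitsL : Nat → List Char
  | 0 => []
  | n + 1 => Char.ofNat ((n + 1) % 94 + 33) :: digitsL ((n + 1) / 94)
decreasing_by exact Nat.div_lt_self (by omega) (by omega)

theorem digitsL_pos (n : Nat) (h : n ≠ 0) :
    digitsL n = Char.ofNat (n % 94 + 33) :: digitsL (n / 94) := by
  cases n with
  | zero => exact absurd rfl h
  | succ m => rw [digitsL]

theorem goB_eq (n : Nat) : goB n = String.mk (digitsL n).reverse := by
  induction n using Nat.strong_induction_on with
  | _ n ih =>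
    by_cases h : n = 0
    · subst h; simp [goB, digitsL]; rfl
    · rw [goB, if_neg h, digitsL_pos n h,
        ih (n / 94) (Nat.div_lt_self (Nat.pos_of_ne_zero h) (by omega))]
      simp [String.mk]
      rfl

theorem encodeLoopA_eq (fuel n : Nat) (r : List Char) (hf : n ≤ fuel) :
    encodeLoopA fuel (n : Int) r = r ++ digitsL n := by
  induction fuel generalizing n r with
  | zero => interval_cases n; simp [encodeLoopA, digitsL]
  | succ fuel ih =>
    by_cases h : n = 0
    · subst h; simp [encodeLoopA, digitsL]
    · rw [encodeLoopA, if_pos (by exact_mod_cast h)]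
      have hq : PySem.Int.floordiv (n : Int) 94 = ((n / 94 : Nat) : Int) :=
        PySem.Int.floordiv_natCast n 94
      have hm : PySem.Int.mod (n : Int) 94 = ((n % 94 : Nat) : Int) :=
        PySem.Int.mod_natCast n 94
      rw [hq, hm]
      have : ((n % 94 : Nat) : Int) + 33 = ((n % 94 + 33 : Nat) : Int) := by push_cast; ring
      rw [this, Int.toNat_natCast,
        ih (n / 94) _ (by
          have := Nat.div_lt_self (Nat.pos_of_ne_zero h) (show 1 < 94 by omega)
          omega)]
      rw [digitsL_pos n h]
      simp

-- ===== VERDICT (by name: the statement is the Claim_ definition above) =====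
theorem encode_int_spec : Claim_equal_encode_int := by
  intro v _ hpre
  unfold Spec_encode_int encode_int encode_int_alt
  obtain ⟨n, rfl⟩ := Int.eq_ofNat_of_zero_le hpre
  rw [show (n : Int).natAbs = n from Int.natAbs_natCast n,
    encodeLoopA_eq (n + 1) n [] (by omega)]
  by_cases h : n = 0
  · subst h; simp [digitsL]
  · rw [if_neg (by exact_mod_cast h), Int.toNat_natCast, goB_eq]
    simp [digitsL_pos n h]
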